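-- pv_equiv track=rewrite | github.com/ltjed/freephdlabor | freephdlabor/toolkits/writeup/data_discovery_tool.py | _categorize_plot_from_filename
-- ===== SOURCE A (Python) =====
-- def _categorize_plot_from_filename(filename: str) -> str:
--     """Categorize plot type based on filename patterns."""
--     filename_lower = filename.lower()
--
--     # Training-related plots
--     if any(pattern in filename_lower for pattern in ['loss', 'train', 'accuracy', 'metric']):
--         return "training_analysis"
--
--     # Comparison plots
--     if any(pattern in filename_lower for pattern in ['comparison', 'baseline', 'ablation', 'vs']):
--         return "method_comparison"
--
--     # Statistical plots
--     if any(pattern in filename_lower for pattern in ['distribution', 'histogram', 'correlation', 'scatter']):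
--         return "statistical_analysis"
--
--     # Experimental plots
--     if any(pattern in filename_lower for pattern in ['experiment', 'result', 'performance']):
--         return "experimental_results"
--
--     # Learning curves
--     if any(pattern in filename_lower for pattern in ['curve', 'learning', 'convergence']):
--         return "learning_curves"
--
--     # Architecture/model plots
--     if any(pattern in filename_lower for pattern in ['architecture', 'model', 'network']):
--         return "model_visualization"
--
--     return "general_plot"
-- ===== SOURCE B (Python) =====
-- _KEYWORD_CATEGORIES = [
--     ("loss", "training_analysis"),
--     ("train", "training_analysis"),
--     ("accuracy", "training_analysis"),
--     ("metric", "training_analysis"),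
--     ("comparison", "method_comparison"),
--     ("baseline", "method_comparison"),
--     ("ablation", "method_comparison"),
--     ("vs", "method_comparison"),
--     ("distribution", "statistical_analysis"),
--     ("histogram", "statistical_analysis"),
--     ("correlation", "statistical_analysis"),
--     ("scatter", "statistical_analysis"),
--     ("experiment", "experimental_results"),
--     ("result", "experimental_results"),
--     ("performance", "experimental_results"),
--     ("curve", "learning_curves"),
--     ("learning", "learning_curves"),
--     ("convergence", "learning_curves"),
--     ("architecture", "model_visualization"),
--     ("model", "model_visualization"),
--     ("network", "model_visualization"),
-- ]
--
--
-- def _categorize_plot_from_filename(filename: str) -> str: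
--     """Categorize plot type: one flat reverse scan over a keyword->category list.
--
--     The list is ordered by priority; scanning it back-to-front and overwriting
--     the accumulator makes the highest-priority matching keyword win, so no
--     early return and no per-group any() is needed.
--     """
--     name = filename.lower()
--     category = "general_plot"
--     for keyword, cat in reversed(_KEYWORD_CATEGORIES):
--         if keyword in name:
--             category = cat
--     return category
-- ===== Notes on version B (the rewrite author's own statement) =====
-- stated objective: alternative
-- what changed: Replaces A's six early-return any()-per-group branches by one flat keyword->category pair list scanned back-to-front with an overwrite accumulator, so the highest-priority matching keyword wins without early return or per-group inner scans.
import Mathlib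
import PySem

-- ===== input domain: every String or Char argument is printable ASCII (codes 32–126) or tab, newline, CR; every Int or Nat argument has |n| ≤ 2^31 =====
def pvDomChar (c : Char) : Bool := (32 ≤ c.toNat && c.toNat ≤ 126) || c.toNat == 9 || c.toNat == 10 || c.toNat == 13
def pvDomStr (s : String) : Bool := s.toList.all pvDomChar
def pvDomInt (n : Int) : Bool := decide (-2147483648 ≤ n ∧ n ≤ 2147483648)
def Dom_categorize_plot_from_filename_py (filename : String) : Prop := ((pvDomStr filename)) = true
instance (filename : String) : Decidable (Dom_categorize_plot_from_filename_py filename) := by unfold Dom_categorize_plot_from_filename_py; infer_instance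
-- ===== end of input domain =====

-- B replaces A's six early-return pattern-group branches by ONE flat keyword→category list,
-- scanned in REVERSE priority order with an overwrite accumulator (last match wins = highest
-- priority); objective: alternative decomposition, same cost.
-- ===== PORT A =====
def categorize_plot_from_filename_py (filename : String) : String :=
  let filename_lower := PySem.Str.lower filename
  if ["loss", "train", "accuracy", "metric"].any (fun p => PySem.Str.isIn p filename_lower) then
    "training_analysis"
  else if ["comparison", "baseline", "ablation", "vs"].any (fun p => PySem.Str.isIn p filename_lower) then
    "method_comparison"
  else if ["distribution", "histogram", "correlation", "scatter"].any (fun p => PySem.Str.isIn p filename_lower) then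
    "statistical_analysis"
  else if ["experiment", "result", "performance"].any (fun p => PySem.Str.isIn p filename_lower) then
    "experimental_results"
  else if ["curve", "learning", "convergence"].any (fun p => PySem.Str.isIn p filename_lower) then
    "learning_curves"
  else if ["architecture", "model", "network"].any (fun p => PySem.Str.isIn p filename_lower) then
    "model_visualization"
  else
    "general_plot"

-- ===== PORT B =====
def pvKeywordCategories : List (String × String) :=
  [ ("loss", "training_analysis"),
    ("train", "training_analysis"),
    ("accuracy", "training_analysis"),
    ("metric", "training_analysis"),
    ("comparison", "method_comparison"),
    ("baseline", "method_comparison"),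
    ("ablation", "method_comparison"),
    ("vs", "method_comparison"),
    ("distribution", "statistical_analysis"),
    ("histogram", "statistical_analysis"),
    ("correlation", "statistical_analysis"),
    ("scatter", "statistical_analysis"),
    ("experiment", "experimental_results"),
    ("result", "experimental_results"),
    ("performance", "experimental_results"),
    ("curve", "learning_curves"),
    ("learning", "learning_curves"),
    ("convergence", "learning_curves"),
    ("architecture", "model_visualization"),
    ("model", "model_visualization"),
    ("network", "model_visualization") ]

def categorize_plot_from_filename_py_alt (filename : String) : String :=
  let name := PySem.Str.lower filename
  pvKeywordCategories.reverse.foldl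
    (fun category kc => if PySem.Str.isIn kc.1 name then kc.2 else category)
    "general_plot"

-- ===== PRECONDITION & SPEC =====
def Spec_categorize_plot_from_filename_py (filename : String) (out : String) : Prop := out = categorize_plot_from_filename_py_alt filename
instance (filename : String) (out : String) : Decidable (Spec_categorize_plot_from_filename_py filename out) := by unfold Spec_categorize_plot_from_filename_py; infer_instance

-- ===== CLAIM (what is proved, stated in full; the proofs are below) =====
def Claim_equal_categorize_plot_from_filename_py : Prop := ∀ (filename : String), Dom_categorize_plot_from_filename_py filename → Spec_categorize_plot_from_filename_py filename (categorize_plot_from_filename_py filename)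

-- ===== LEMMAS AND PROOFS =====

-- ===== VERDICT (by name: the statement is the Claim_ definition above) =====
set_option maxHeartbeats 2000000 in
theorem categorize_plot_from_filename_py_spec : Claim_equal_categorize_plot_from_filename_py := by
  intro f _
  unfold Spec_categorize_plot_from_filename_py categorize_plot_from_filename_py
    categorize_plot_from_filename_py_alt pvKeywordCategories
  generalize PySem.Str.lower f = name
  simp only [List.reverse_cons, List.reverse_nil, List.nil_append, List.cons_append,
    List.foldl_cons, List.foldl_nil, List.any_cons, List.any_nil, Bool.or_false]
  generalize PySem.Str.isIn "loss" name = b0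
  generalize PySem.Str.isIn "train" name = b1
  generalize PySem.Str.isIn "accuracy" name = b2
  generalize PySem.Str.isIn "metric" name = b3
  generalize PySem.Str.isIn "comparison" name = b4
  generalize PySem.Str.isIn "baseline" name = b5
  generalize PySem.Str.isIn "ablation" name = b6
  generalize PySem.Str.isIn "vs" name = b7
  generalize PySem.Str.isIn "distribution" name = b8
  generalize PySem.Str.isIn "histogram" name = b9
  generalize PySem.Str.isIn "correlation" name = b10
  generalize PySem.Str.isIn "scatter" name = b11
  generalize PySem.Str.isIn "experiment" name = b12
  generalize PySem.Str.isIn "result" name = b13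
  generalize PySem.Str.isIn "performance" name = b14
  generalize PySem.Str.isIn "curve" name = b15
  generalize PySem.Str.isIn "learning" name = b16
  generalize PySem.Str.isIn "convergence" name = b17
  generalize PySem.Str.isIn "architecture" name = b18
  generalize PySem.Str.isIn "model" name = b19
  generalize PySem.Str.isIn "network" name = b20
  cases b0 <;> simp
  cases b1 <;> simp
  cases b2 <;> simp
  cases b3 <;> simp
  cases b4 <;> simp
  cases b5 <;> simp
  cases b6 <;> simp
  cases b7 <;> simp
  cases b8 <;> simp
  cases b9 <;> simp
  cases b10 <;> simp
  cases b11 <;> simp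
  cases b12 <;> simp
  cases b13 <;> simp
  cases b14 <;> simp
  cases b15 <;> simp
  cases b16 <;> simp
  cases b17 <;> simp
  cases b18 <;> simp
  cases b19 <;> simp
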